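-- pv_equiv track=rewrite | github.com/Albertree/SOAR-ARC-test | procedural_memory/base_rules/_primitives.py | connect_aligned_diamonds
-- ===== SOURCE A (Python) =====
-- def connect_aligned_diamonds(grid, diamond_color, line_color, bg=0):
--     """Find diamond/cross shapes of diamond_color and connect aligned ones with lines.
--     Each diamond is a 4-cell cross: top, left, right, bottom around a bg center.
--     Diamonds sharing the same center row get horizontal lines between their tips.
--     Diamonds sharing the same center column get vertical lines between their tips."""
--     h = len(grid)
--     w = len(grid[0]) if grid else 0
--     output = [row[:] for row in grid]
--
--     # Find diamond centers: bg cell with diamond_color in all 4 cardinal directions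
--     centers = []
--     for r in range(1, h - 1):
--         for c in range(1, w - 1):
--             if grid[r][c] == bg:
--                 if (grid[r-1][c] == diamond_color and grid[r+1][c] == diamond_color and
--                     grid[r][c-1] == diamond_color and grid[r][c+1] == diamond_color):
--                     centers.append((r, c))
--
--     # Connect horizontally aligned (same row) diamonds
--     row_groups = {}
--     for r, c in centers:
--         row_groups.setdefault(r, []).append(c)
--     for r, cols in row_groups.items():
--         cols.sort()
--         for i in range(len(cols) - 1):
--             c1 = cols[i] + 2  # right tip + 1
--             c2 = cols[i+1] - 1  # left tip
--             for c in range(c1, c2):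
--                 if output[r][c] == bg:
--                     output[r][c] = line_color
--
--     # Connect vertically aligned (same column) diamonds
--     col_groups = {}
--     for r, c in centers:
--         col_groups.setdefault(c, []).append(r)
--     for c, rows in col_groups.items():
--         rows.sort()
--         for i in range(len(rows) - 1):
--             r1 = rows[i] + 2  # bottom tip + 1
--             r2 = rows[i+1] - 1  # top tip
--             for r in range(r1, r2):
--                 if output[r][c] == bg:
--                     output[r][c] = line_color
--
--     return output
-- ===== SOURCE B (Python) =====
-- def connect_aligned_diamonds(grid, diamond_color, line_color, bg=0):
--     """Find diamond/cross shapes of diamond_color and connect aligned ones with lines.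
--
--     Single pass over the centers: each center scans right (and down) for the
--     nearest aligned center and draws the connecting line at once -- no row/column
--     grouping dicts and no sorting."""
--     h = len(grid)
--     w = len(grid[0]) if grid else 0
--     output = [row[:] for row in grid]
--
--     centers = []
--     for r in range(1, h - 1):
--         for c in range(1, w - 1):
--             if grid[r][c] == bg:
--                 if (grid[r-1][c] == diamond_color and grid[r+1][c] == diamond_color and
--                     grid[r][c-1] == diamond_color and grid[r][c+1] == diamond_color):
--                     centers.append((r, c))
--     center_set = set(centers)
--
--     for r, c in centers:
--         # nearest center to the right in the same row
--         c2 = c + 1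
--         while c2 < w:
--             if (r, c2) in center_set:
--                 for k in range(c + 2, c2 - 1):
--                     if output[r][k] == bg:
--                         output[r][k] = line_color
--                 break
--             c2 += 1
--         # nearest center below in the same column
--         r2 = r + 1
--         while r2 < h:
--             if (r2, c) in center_set:
--                 for k in range(r + 2, r2 - 1):
--                     if output[k][c] == bg:
--                         output[k][c] = line_color
--                 break
--             r2 += 1
--     return output
-- ===== Notes on version B (the rewrite author's own statement) =====
-- stated objective: alternative
-- what changed: A groups center coordinates into row/column dicts, sorts each group and fills between consecutive entries; B makes a single pass over the centers and, for each one, scans right and down through the grid for the nearest aligned center (set membership) and draws that connecting line immediately, with no grouping dicts and no sorting.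
import Mathlib
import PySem

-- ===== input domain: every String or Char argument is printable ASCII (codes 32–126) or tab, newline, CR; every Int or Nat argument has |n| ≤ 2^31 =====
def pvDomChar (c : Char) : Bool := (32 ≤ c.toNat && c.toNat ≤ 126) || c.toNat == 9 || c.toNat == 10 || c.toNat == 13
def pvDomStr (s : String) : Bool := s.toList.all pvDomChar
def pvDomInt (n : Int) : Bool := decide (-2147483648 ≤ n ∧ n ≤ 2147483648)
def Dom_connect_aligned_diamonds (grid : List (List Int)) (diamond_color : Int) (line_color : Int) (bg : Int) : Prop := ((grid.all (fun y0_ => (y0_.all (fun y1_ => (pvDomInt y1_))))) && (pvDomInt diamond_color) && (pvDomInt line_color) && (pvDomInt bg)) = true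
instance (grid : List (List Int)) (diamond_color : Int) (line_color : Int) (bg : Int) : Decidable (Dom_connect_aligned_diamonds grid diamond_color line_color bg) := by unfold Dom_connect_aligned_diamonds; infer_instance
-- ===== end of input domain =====

-- B replaces A's row/column grouping dicts + sorting + consecutive-pair fills by a single
-- pass over the centers in which each center scans right/down for the nearest aligned
-- center and draws that connecting line at once (objective: alternative, same cost).

-- ===== PORT A =====
-- shared helpers: Python cell reads/writes `grid[r][c]` (indices here are always ≥ 0,
-- and in range under Pre_, where pyGetD/pySetD are exact)
def pvCellAt (g : List (List Int)) (r c : Int) : Int :=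
  PySem.List.pyGetD (PySem.List.pyGetD g r []) c 0

def pvH (grid : List (List Int)) : Int := PySem.List.len grid
def pvW (grid : List (List Int)) : Int :=
  match grid with
  | [] => 0
  | row :: _ => PySem.List.len row

-- the center-detection condition of both Pythons, word for word
def pvIsCenter (grid : List (List Int)) (diamond_color bg : Int) (r c : Int) : Bool :=
  pvCellAt grid r c == bg &&
    (pvCellAt grid (r-1) c == diamond_color && pvCellAt grid (r+1) c == diamond_color &&
     pvCellAt grid r (c-1) == diamond_color && pvCellAt grid r (c+1) == diamond_color)

-- the identical centers-collecting double loop of both Pythons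
def pvCenters (grid : List (List Int)) (diamond_color bg : Int) : List (Int × Int) :=
  (PySem.List.pyRange 1 (pvH grid - 1)).foldl (fun acc r =>
    (PySem.List.pyRange 1 (pvW grid - 1)).foldl (fun acc2 c =>
      if pvIsCenter grid diamond_color bg r c then acc2 ++ [(r, c)] else acc2) acc) []

-- `output[r][c] = v`
def pvSetCell (st : List (List Int)) (r c v : Int) : List (List Int) :=
  PySem.List.pySetD st r (PySem.List.pySetD (PySem.List.pyGetD st r []) c v)

-- `if output[r][c] == bg: output[r][c] = line_color`
def pvFill (bg lc : Int) (st : List (List Int)) (r c : Int) : List (List Int) :=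
  if pvCellAt st r c == bg then pvSetCell st r c lc else st

-- one iteration of A's `for r, cols in row_groups.items()` loop
def pvRowPass (bg lc : Int) (st : List (List Int)) (p : Int × List Int) : List (List Int) :=
  let cols := PySem.List.sorted p.2 (fun x => x)
  (PySem.List.pyRange 0 (PySem.List.len cols - 1)).foldl (fun st2 i =>
    (PySem.List.pyRange (PySem.List.pyGetD cols i 0 + 2) (PySem.List.pyGetD cols (i + 1) 0 - 1)).foldl
      (fun st3 c => pvFill bg lc st3 p.1 c) st2) st

-- one iteration of A's `for c, rows in col_groups.items()` loop
def pvColPass (bg lc : Int) (st : List (List Int)) (p : Int × List Int) : List (List Int) :=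
  let rows := PySem.List.sorted p.2 (fun x => x)
  (PySem.List.pyRange 0 (PySem.List.len rows - 1)).foldl (fun st2 i =>
    (PySem.List.pyRange (PySem.List.pyGetD rows i 0 + 2) (PySem.List.pyGetD rows (i + 1) 0 - 1)).foldl
      (fun st3 r => pvFill bg lc st3 r p.1) st2) st

def connect_aligned_diamonds (grid : List (List Int)) (diamond_color : Int) (line_color : Int) (bg : Int) : List (List Int) :=
  let output := grid.map (fun row => row)
  let centers := pvCenters grid diamond_color bg
  let row_groups := centers.foldl (fun d p => d.modify p.1 [] (fun v => v ++ [p.2])) PySem.Dict.empty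
  let output := row_groups.items.foldl (pvRowPass bg line_color) output
  let col_groups := centers.foldl (fun d p => d.modify p.2 [] (fun v => v ++ [p.1])) PySem.Dict.empty
  col_groups.items.foldl (pvColPass bg line_color) output

-- ===== PORT B =====
-- `while c2 < w: if (r, c2) in center_set: ...; break; c2 += 1` — the rightward scan
def pvFindRight (S : PySem.Set (Int × Int)) (r c2 w : Int) : Option Int :=
  if h : c2 < w then
    if PySem.Set.contains S (r, c2) then some c2 else pvFindRight S r (c2 + 1) w
  else none
termination_by (w - c2).toNat
decreasing_by simp_wf; omega

-- the downward scan
def pvFindDown (S : PySem.Set (Int × Int)) (c r2 h : Int) : Option Int :=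
  if hh : r2 < h then
    if PySem.Set.contains S (r2, c) then some r2 else pvFindDown S c (r2 + 1) h
  else none
termination_by (h - r2).toNat
decreasing_by simp_wf; omega

-- B's loop body for one center: scan right, draw; scan down, draw
def pvBStep (bg lc w h : Int) (S : PySem.Set (Int × Int)) (st : List (List Int)) (p : Int × Int) : List (List Int) :=
  let st1 := match pvFindRight S p.1 (p.2 + 1) w with
    | some c2 => (PySem.List.pyRange (p.2 + 2) (c2 - 1)).foldl (fun s k => pvFill bg lc s p.1 k) st
    | none => st
  match pvFindDown S p.2 (p.1 + 1) h with
  | some r2 => (PySem.List.pyRange (p.1 + 2) (r2 - 1)).foldl (fun s k => pvFill bg lc s k p.2) st1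
  | none => st1

def connect_aligned_diamonds_alt (grid : List (List Int)) (diamond_color : Int) (line_color : Int) (bg : Int) : List (List Int) :=
  let h := pvH grid
  let w := pvW grid
  let output := grid.map (fun row => row)
  let centers := pvCenters grid diamond_color bg
  let S := PySem.Set.ofList centers
  centers.foldl (pvBStep bg line_color w h S) output

-- ===== PRECONDITION & SPEC =====
-- Pre_ excludes ragged grids (some row shorter than the first row) that are at least 3 rows
-- tall and 3 columns wide: on those the Pythons' neighbour indexing grid[r][c±1] can raise
-- IndexError (whether it does depends on the cell values; where A still returns because every
-- probed cell misses bg, both programs return the same copy).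
def Pre_connect_aligned_diamonds (grid : List (List Int)) (diamond_color : Int) (line_color : Int) (bg : Int) : Prop :=
  grid.length < 3 ∨ (grid.headD []).length < 3 ∨ ∀ row ∈ grid, (grid.headD []).length ≤ row.length
instance (grid : List (List Int)) (diamond_color : Int) (line_color : Int) (bg : Int) : Decidable (Pre_connect_aligned_diamonds grid diamond_color line_color bg) := by unfold Pre_connect_aligned_diamonds; infer_instance

def pvWitness_connect_aligned_diamonds : List (List Int) × Int × Int × Int :=
  ([[0,1,0,0,0,1,0],[1,0,1,0,1,0,1],[0,1,0,0,0,1,0]], (1, (2, 0)))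

def Spec_connect_aligned_diamonds (grid : List (List Int)) (diamond_color : Int) (line_color : Int) (bg : Int) (out : List (List Int)) : Prop := out = connect_aligned_diamonds_alt grid diamond_color line_color bg
instance (grid : List (List Int)) (diamond_color : Int) (line_color : Int) (bg : Int) (out : List (List Int)) : Decidable (Spec_connect_aligned_diamonds grid diamond_color line_color bg out) := by unfold Spec_connect_aligned_diamonds; infer_instance

-- ===== CLAIM (what is proved, stated in full; the proofs are below) =====
def Claim_equal_connect_aligned_diamonds : Prop := ∀ (grid : List (List Int)) (diamond_color : Int) (line_color : Int) (bg : Int), Dom_connect_aligned_diamonds grid diamond_color line_color bg → Pre_connect_aligned_diamonds grid diamond_color line_color bg → Spec_connect_aligned_diamonds grid diamond_color line_color bg (connect_aligned_diamonds grid diamond_color line_color bg)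

-- ===== LEMMAS AND PROOFS =====

-- ---- generic fill machinery ----
def pvCellN (st : List (List Int)) (i j : Nat) : Int := (st.getD i []).getD j 0

def pvApply (bg lc : Int) (st : List (List Int)) (L : List (Int × Int)) : List (List Int) :=
  L.foldl (fun s rc => pvFill bg lc s rc.1 rc.2) st

theorem pvApply_append (bg lc : Int) (st : List (List Int)) (L1 L2 : List (Int × Int)) :
    pvApply bg lc st (L1 ++ L2) = pvApply bg lc (pvApply bg lc st L1) L2 := by
  simp [pvApply, List.foldl_append]

theorem foldl_pvApply {α : Type} (bg lc : Int) (l : List α) (g : α → List (Int × Int)) (st : List (List Int)) :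
    l.foldl (fun s x => pvApply bg lc s (g x)) st = pvApply bg lc st (l.flatMap g) := by
  induction l generalizing st with
  | nil => simp [pvApply]
  | cons a t ih => simp [List.flatMap_cons, pvApply_append, ih]

theorem pvApply_map_snd (bg lc : Int) (l : List Int) (r : Int) (st : List (List Int)) :
    pvApply bg lc st (l.map (fun c => (r, c))) = l.foldl (fun s c => pvFill bg lc s r c) st := by
  simp [pvApply, List.foldl_map]

theorem pvApply_map_fst (bg lc : Int) (l : List Int) (c : Int) (st : List (List Int)) :
    pvApply bg lc st (l.map (fun r => (r, c))) = l.foldl (fun s r => pvFill bg lc s r c) st := by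
  simp [pvApply, List.foldl_map]

theorem pvFill_length (bg lc : Int) (st : List (List Int)) (r c : Int) :
    (pvFill bg lc st r c).length = st.length := by
  unfold pvFill pvSetCell
  split <;> simp [PySem.List.length_pySetD]

theorem pvFill_row_length (bg lc : Int) (st : List (List Int)) (r c : Int)
    (hr : 0 ≤ r) (i : Nat) :
    ((pvFill bg lc st r c).getD i []).length = (st.getD i []).length := by
  obtain ⟨n, rfl⟩ : ∃ n : Nat, r = (n : Int) := ⟨r.toNat, (Int.toNat_of_nonneg hr).symm⟩
  unfold pvFill pvSetCell
  split
  · simp only [PySem.List.pySetD_natCast, PySem.List.pyGetD_natCast,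
      List.getD_eq_getElem?_getD, List.getElem?_set]
    split
    · rename_i hin
      split
      · simp only [← hin, PySem.List.length_pySetD, Option.getD_some]
      · rename_i hlt
        rw [List.getElem?_eq_none (by omega)]
    · rfl
  · rfl

theorem pvFill_cellN_ne (bg lc : Int) (st : List (List Int)) (r c : Int)
    (hr : 0 ≤ r) (hc : 0 ≤ c) (i j : Nat) (hne : (r, c) ≠ ((i : Int), (j : Int))) :
    pvCellN (pvFill bg lc st r c) i j = pvCellN st i j := by
  obtain ⟨n, rfl⟩ : ∃ n : Nat, r = (n : Int) := ⟨r.toNat, (Int.toNat_of_nonneg hr).symm⟩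
  obtain ⟨m, rfl⟩ : ∃ m : Nat, c = (m : Int) := ⟨c.toNat, (Int.toNat_of_nonneg hc).symm⟩
  have hnm : n ≠ i ∨ m ≠ j := by
    by_contra h
    push Not at h
    exact hne (by simp [h.1, h.2])
  unfold pvFill pvSetCell pvCellN
  split
  · simp only [PySem.List.pySetD_natCast, PySem.List.pyGetD_natCast]
    rcases hnm with h | h
    · rw [List.getD_eq_getElem?_getD (l := List.set st n _),
        List.getElem?_set_ne h, ← List.getD_eq_getElem?_getD]
    · rw [List.getD_eq_getElem?_getD (l := List.set st n _), List.getElem?_set]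
      split
      · rename_i hin
        split
        · simp only [Option.getD_some, ← hin, List.getD_eq_getElem?_getD (l := List.set _ m _),
            List.getElem?_set_ne h, ← List.getD_eq_getElem?_getD]
        · rename_i hlt
          simp [List.getElem?_eq_none (show st.length ≤ i by omega),
            List.getD_eq_getElem?_getD (l := st)]
      · rw [← List.getD_eq_getElem?_getD]
  · rfl

theorem pvFill_cellN_self (bg lc : Int) (st : List (List Int)) (i j : Nat)
    (hi : i < st.length) (hj : j < (st.getD i []).length) :
    pvCellN (pvFill bg lc st (i : Int) (j : Int)) i j =
      if pvCellN st i j = bg then lc else pvCellN st i j := by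
  unfold pvFill pvSetCell pvCellN
  simp only [pvCellAt, PySem.List.pySetD_natCast, PySem.List.pyGetD_natCast, beq_iff_eq]
  split
  · have hj' : j < st[i].length := by rwa [List.getD_eq_getElem _ _ hi] at hj
    simp [List.getD_eq_getElem?_getD, List.getElem?_set, hi, hj']
  · rfl

theorem pvApply_length (bg lc : Int) (st : List (List Int)) (L : List (Int × Int)) :
    (pvApply bg lc st L).length = st.length := by
  induction L generalizing st with
  | nil => rfl
  | cons a t ih => simpa [pvApply] using (ih (pvFill bg lc st a.1 a.2)).trans (pvFill_length bg lc st a.1 a.2)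

theorem pvApply_row_length (bg lc : Int) (st : List (List Int)) (L : List (Int × Int))
    (hL : ∀ rc ∈ L, 0 ≤ rc.1 ∧ 0 ≤ rc.2) (i : Nat) :
    ((pvApply bg lc st L).getD i []).length = (st.getD i []).length := by
  induction L generalizing st with
  | nil => rfl
  | cons a t ih =>
    have h1 := hL a (by simp)
    have := ih (st := pvFill bg lc st a.1 a.2) (fun rc h => hL rc (by simp [h]))
    simpa [pvApply] using this.trans (pvFill_row_length bg lc st a.1 a.2 h1.1 i)

theorem pvCellN_pvApply (bg lc : Int) (L : List (Int × Int)) (st : List (List Int))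
    (hL : ∀ rc ∈ L, 0 ≤ rc.1 ∧ 0 ≤ rc.2) (i j : Nat)
    (hi : i < st.length) (hj : j < (st.getD i []).length) :
    pvCellN (pvApply bg lc st L) i j =
      if ((i : Int), (j : Int)) ∈ L ∧ pvCellN st i j = bg then lc else pvCellN st i j := by
  induction L generalizing st with
  | nil => simp [pvApply]
  | cons a t ih =>
    obtain ⟨ha1, ha2⟩ := hL a (by simp)
    have hlen : (pvFill bg lc st a.1 a.2).length = st.length := pvFill_length bg lc st a.1 a.2
    have hrow : ∀ k, ((pvFill bg lc st a.1 a.2).getD k []).length = (st.getD k []).length :=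
      pvFill_row_length bg lc st a.1 a.2 ha1
    have step : pvApply bg lc st (a :: t) = pvApply bg lc (pvFill bg lc st a.1 a.2) t := rfl
    rw [step, ih (pvFill bg lc st a.1 a.2) (fun rc h => hL rc (by simp [h])) (by omega)
      (by rw [hrow]; exact hj)]
    by_cases hsame : a = ((i : Int), (j : Int))
    · subst hsame
      rw [show pvCellN (pvFill bg lc st (i : Int) (j : Int)) i j =
            if pvCellN st i j = bg then lc else pvCellN st i j from
          pvFill_cellN_self bg lc st i j hi hj]
      by_cases hbg : pvCellN st i j = bg
      · simp only [hbg, if_pos rfl]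
        by_cases hlcbg : lc = bg <;> simp [hlcbg]
      · simp [hbg]
    · rw [pvFill_cellN_ne bg lc st a.1 a.2 ha1 ha2 i j (by simpa using hsame)]
      have hmemiff : (((i : Int), (j : Int)) ∈ a :: t) ↔ (((i : Int), (j : Int)) ∈ t) := by
        constructor
        · intro h
          rcases List.mem_cons.1 h with h | h
          · exact absurd h.symm hsame
          · exact h
        · intro h
          exact List.mem_cons_of_mem _ h
      simp only [hmemiff]

theorem pvApply_eq_of_mem_iff (bg lc : Int) (st : List (List Int)) (L1 L2 : List (Int × Int))
    (h1 : ∀ rc ∈ L1, 0 ≤ rc.1 ∧ 0 ≤ rc.2) (h2 : ∀ rc ∈ L2, 0 ≤ rc.1 ∧ 0 ≤ rc.2)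
    (hmem : ∀ p : Int × Int, p ∈ L1 ↔ p ∈ L2) :
    pvApply bg lc st L1 = pvApply bg lc st L2 := by
  apply List.ext_getElem
  · rw [pvApply_length, pvApply_length]
  · intro i h1i h2i
    have hist : i < st.length := by rw [pvApply_length] at h1i; exact h1i
    have r1 : (pvApply bg lc st L1)[i] = (pvApply bg lc st L1).getD i [] :=
      (List.getD_eq_getElem _ _ h1i).symm
    have r2 : (pvApply bg lc st L2)[i] = (pvApply bg lc st L2).getD i [] :=
      (List.getD_eq_getElem _ _ h2i).symm
    rw [r1, r2]
    have e1 : ((pvApply bg lc st L1).getD i []).length = (st.getD i []).length :=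
      pvApply_row_length bg lc st L1 h1 i
    have e2 : ((pvApply bg lc st L2).getD i []).length = (st.getD i []).length :=
      pvApply_row_length bg lc st L2 h2 i
    apply List.ext_getElem
    · rw [e1, e2]
    · intro j hj1 hj2
      have hjst : j < (st.getD i []).length := by rw [← e1]; exact hj1
      have c1 := pvCellN_pvApply bg lc L1 st h1 i j hist hjst
      have c2 := pvCellN_pvApply bg lc L2 st h2 i j hist hjst
      unfold pvCellN at c1 c2
      rw [List.getD_eq_getElem _ _ hj1] at c1
      rw [List.getD_eq_getElem _ _ hj2] at c2
      rw [c1, c2]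
      simp only [hmem ((i : Int), (j : Int))]

-- ---- characterization of the centers ----
def pvRowCols (grid : List (List Int)) (dc bg : Int) (r : Int) : List Int :=
  (PySem.List.pyRange 1 (pvW grid - 1)).filter (fun c => pvIsCenter grid dc bg r c)

def pvColRows (grid : List (List Int)) (dc bg : Int) (c : Int) : List Int :=
  (PySem.List.pyRange 1 (pvH grid - 1)).filter (fun r => decide (c ∈ pvRowCols grid dc bg r))

theorem pvCenters_eq (grid : List (List Int)) (dc bg : Int) :
    pvCenters grid dc bg =
      (PySem.List.pyRange 1 (pvH grid - 1)).flatMap (fun r =>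
        (pvRowCols grid dc bg r).map (fun c => (r, c))) := by
  unfold pvCenters pvRowCols
  simp only [PySem.List.foldl_append_if, PySem.List.foldl_append_eq_flatMap, List.nil_append]

theorem mem_pvCenters (grid : List (List Int)) (dc bg : Int) (r c : Int) :
    (r, c) ∈ pvCenters grid dc bg ↔
      (1 ≤ r ∧ r < pvH grid - 1) ∧ c ∈ pvRowCols grid dc bg r := by
  rw [pvCenters_eq]
  simp only [List.mem_flatMap, List.mem_map, PySem.List.mem_pyRange_one, Prod.mk.injEq]
  constructor
  · rintro ⟨a, ha, x, hx, rfl, rfl⟩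
    exact ⟨ha, hx⟩
  · rintro ⟨ha, hx⟩
    exact ⟨r, ha, c, hx, rfl, rfl⟩

theorem mem_pvRowCols (grid : List (List Int)) (dc bg : Int) (r c : Int) :
    c ∈ pvRowCols grid dc bg r ↔
      (1 ≤ c ∧ c < pvW grid - 1) ∧ pvIsCenter grid dc bg r c = true := by
  simp [pvRowCols, List.mem_filter, PySem.List.mem_pyRange_one, and_assoc]

theorem mem_pvColRows (grid : List (List Int)) (dc bg : Int) (r c : Int) :
    r ∈ pvColRows grid dc bg c ↔ (r, c) ∈ pvCenters grid dc bg := by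
  simp [pvColRows, List.mem_filter, PySem.List.mem_pyRange_one, mem_pvCenters, and_assoc]

theorem pairwise_pvRowCols (grid : List (List Int)) (dc bg : Int) (r : Int) :
    (pvRowCols grid dc bg r).Pairwise (· < ·) :=
  (PySem.List.pairwise_lt_pyRange_one 1 (pvW grid - 1)).filter _

theorem pairwise_pvColRows (grid : List (List Int)) (dc bg : Int) (c : Int) :
    (pvColRows grid dc bg c).Pairwise (· < ·) :=
  (PySem.List.pairwise_lt_pyRange_one 1 (pvH grid - 1)).filter _

-- ---- the canonical "cell between two consecutive aligned centers" predicates ----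
def pvCanH (grid : List (List Int)) (dc bg : Int) (u v : Int) : Prop :=
  ∃ a b : Int, (u, a) ∈ pvCenters grid dc bg ∧ (u, b) ∈ pvCenters grid dc bg ∧ a < b ∧
    (∀ z : Int, a < z → z < b → (u, z) ∉ pvCenters grid dc bg) ∧ a + 2 ≤ v ∧ v < b - 1

def pvCanV (grid : List (List Int)) (dc bg : Int) (u v : Int) : Prop :=
  ∃ a b : Int, (a, v) ∈ pvCenters grid dc bg ∧ (b, v) ∈ pvCenters grid dc bg ∧ a < b ∧
    (∀ z : Int, a < z → z < b → (z, v) ∉ pvCenters grid dc bg) ∧ a + 2 ≤ u ∧ u < b - 1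

-- adjacency in a strictly sorted list = two members with nothing in between
theorem adj_iff (cs : List Int) (hcs : cs.Pairwise (· < ·)) (y : Int) :
    (∃ i : Nat, ∃ hi : i + 1 < cs.length,
        cs[i]'(by omega) + 2 ≤ y ∧ y < cs[i+1]'hi - 1) ↔
      (∃ a b : Int, a ∈ cs ∧ b ∈ cs ∧ a < b ∧ (∀ z ∈ cs, ¬(a < z ∧ z < b)) ∧
        a + 2 ≤ y ∧ y < b - 1) := by
  have hmono := List.pairwise_iff_getElem.1 hcs
  constructor
  · rintro ⟨i, hi, h2, h3⟩
    refine ⟨cs[i]'(by omega), cs[i+1]'hi, List.getElem_mem _, List.getElem_mem _,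
      hmono i (i+1) (by omega) hi (by omega), ?_, h2, h3⟩
    intro z hz ⟨haz, hzb⟩
    obtain ⟨k, hk, rfl⟩ := List.mem_iff_getElem.1 hz
    by_cases hki : k ≤ i
    · rcases eq_or_lt_of_le hki with rfl | hlt
      · omega
      · exact absurd haz (by have := hmono k i hk (by omega) hlt; omega)
    · have hik : i + 1 ≤ k := by omega
      rcases eq_or_lt_of_le hik with rfl | hlt
      · omega
      · exact absurd hzb (by have := hmono (i+1) k hi hk hlt; omega)
  · rintro ⟨a, b, ha, hb, hab, hfree, h5, h6⟩
    obtain ⟨ia, hia, rfl⟩ := List.mem_iff_getElem.1 ha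
    obtain ⟨ib, hib, rfl⟩ := List.mem_iff_getElem.1 hb
    have hord : ia < ib := by
      by_contra hcon
      rcases eq_or_lt_of_le (Nat.le_of_not_lt hcon) with he | hlt
      · subst he
        omega
      · have := hmono ib ia hib hia hlt
        omega
    have hsucc : ib = ia + 1 := by
      by_contra hne
      have hlt : ia + 1 < ib := by omega
      have hz1 := hmono ia (ia+1) hia (by omega) (by omega)
      have hz2 := hmono (ia+1) ib (by omega) hib hlt
      exact hfree (cs[ia+1]'(by omega)) (List.getElem_mem _) ⟨hz1, hz2⟩
    subst hsucc
    exact ⟨ia, hib, h5, h6⟩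

-- ---- the fill-op lists of A ----
def pvRowOps (cs : List Int) (r : Int) : List (Int × Int) :=
  (PySem.List.pyRange 0 (PySem.List.len cs - 1)).flatMap (fun i =>
    (PySem.List.pyRange (PySem.List.pyGetD cs i 0 + 2) (PySem.List.pyGetD cs (i + 1) 0 - 1)).map
      (fun c => (r, c)))

def pvColOps (cs : List Int) (c : Int) : List (Int × Int) :=
  (PySem.List.pyRange 0 (PySem.List.len cs - 1)).flatMap (fun i =>
    (PySem.List.pyRange (PySem.List.pyGetD cs i 0 + 2) (PySem.List.pyGetD cs (i + 1) 0 - 1)).map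
      (fun r => (r, c)))

def pvLAh (grid : List (List Int)) (dc bg : Int) : List (Int × Int) :=
  (PySem.Set.ofList ((pvCenters grid dc bg).map (fun p => p.1))).flatMap (fun r =>
    pvRowOps (pvRowCols grid dc bg r) r)

def pvLAv (grid : List (List Int)) (dc bg : Int) : List (Int × Int) :=
  (PySem.Set.ofList ((pvCenters grid dc bg).map (fun p => p.2))).flatMap (fun c =>
    pvColOps (pvColRows grid dc bg c) c)

-- ---- the fill-op lists of B ----
def pvGH (grid : List (List Int)) (dc bg : Int) (p : Int × Int) : List (Int × Int) :=
  match pvFindRight (PySem.Set.ofList (pvCenters grid dc bg)) p.1 (p.2 + 1) (pvW grid) with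
  | some c2 => (PySem.List.pyRange (p.2 + 2) (c2 - 1)).map (fun k => (p.1, k))
  | none => []

def pvGV (grid : List (List Int)) (dc bg : Int) (p : Int × Int) : List (Int × Int) :=
  match pvFindDown (PySem.Set.ofList (pvCenters grid dc bg)) p.2 (p.1 + 1) (pvH grid) with
  | some r2 => (PySem.List.pyRange (p.1 + 2) (r2 - 1)).map (fun k => (k, p.2))
  | none => []

def pvLB (grid : List (List Int)) (dc bg : Int) : List (Int × Int) :=
  (pvCenters grid dc bg).flatMap (fun p => pvGH grid dc bg p ++ pvGV grid dc bg p)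

-- ---- small list lemmas specific to the grouping shapes ----
theorem flatMap_ite_single {β : Type} (l : List Int) (hl : l.Nodup) (r : Int) (X : List β) :
    (l.flatMap (fun a => if a = r then X else [])) = if r ∈ l then X else [] := by
  induction l with
  | nil => simp
  | cons a t ih =>
    rcases List.nodup_cons.1 hl with ⟨hna, hnt⟩
    by_cases ha : a = r
    · subst ha
      simp [List.flatMap_cons, ih hnt, hna]
    · have hra : ¬ r = a := fun h => ha h.symm
      simp [List.flatMap_cons, ha, ih hnt, hra]

theorem filter_beq_pairwise (l : List Int) (hl : l.Pairwise (· < ·)) (c : Int) :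
    l.filter (fun x => x == c) = if c ∈ l then [c] else [] := by
  induction l with
  | nil => simp
  | cons a t ih =>
    rcases List.pairwise_cons.1 hl with ⟨hfa, ht⟩
    by_cases ha : a = c
    · subst ha
      have hnmem : a ∉ t := fun h => absurd (hfa a h) (lt_irrefl a)
      simp [List.filter_cons, ih ht, hnmem]
    · have hca : ¬ c = a := fun h => ha h.symm
      simp [List.filter_cons, ha, ih ht, hca]

theorem flatMap_ite_singleton {β : Type} (l : List Int) (P : Int → Prop) [DecidablePred P]
    (f : Int → β) :
    l.flatMap (fun a => if P a then [f a] else []) =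
      (l.filter (fun a => decide (P a))).map f := by
  induction l with
  | nil => simp
  | cons a t ih =>
    by_cases ha : P a <;> simp [List.flatMap_cons, List.filter_cons, ha, ih]

theorem grouped_row (grid : List (List Int)) (dc bg : Int) (r : Int)
    (hr1 : 1 ≤ r) (hr2 : r < pvH grid - 1) :
    ((pvCenters grid dc bg).filter (fun p => p.1 == r)).map (fun p => p.2) =
      pvRowCols grid dc bg r := by
  rw [pvCenters_eq, List.filter_flatMap]
  have hin : ∀ a : Int, ((pvRowCols grid dc bg a).map (fun c => (a, c))).filter
        (fun p => p.1 == r)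
      = if a = r then (pvRowCols grid dc bg r).map (fun c => (r, c)) else [] := by
    intro a
    rw [List.filter_map]
    by_cases ha : a = r
    · subst ha
      simp [Function.comp_def]
    · simp [Function.comp_def, ha]
  simp only [hin]
  rw [flatMap_ite_single _ (PySem.List.nodup_pyRange_one 1 (pvH grid - 1)) r _,
    if_pos (PySem.List.mem_pyRange_one.2 ⟨hr1, hr2⟩)]
  simp [Function.comp_def]

theorem grouped_col (grid : List (List Int)) (dc bg : Int) (c : Int) :
    ((pvCenters grid dc bg).filter (fun p => p.2 == c)).map (fun p => p.1) =
      pvColRows grid dc bg c := by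
  rw [pvCenters_eq, List.filter_flatMap]
  have hin : ∀ a : Int, ((pvRowCols grid dc bg a).map (fun x => (a, x))).filter
        (fun p => p.2 == c)
      = if c ∈ pvRowCols grid dc bg a then [(a, c)] else [] := by
    intro a
    rw [List.filter_map]
    have hcomp : (fun p : Int × Int => p.2 == c) ∘ (fun x : Int => (a, x)) =
        (fun x => x == c) := rfl
    rw [hcomp, filter_beq_pairwise _ (pairwise_pvRowCols grid dc bg a) c]
    split <;> simp
  simp only [hin]
  rw [List.map_flatMap]
  have hin2 : ∀ a : Int, ((if c ∈ pvRowCols grid dc bg a then [(a, c)] else []).map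
        (fun p : Int × Int => p.1)) = if c ∈ pvRowCols grid dc bg a then [a] else [] := by
    intro a
    split <;> simp
  simp only [hin2]
  rw [flatMap_ite_singleton _ (fun a => c ∈ pvRowCols grid dc bg a) (fun a => a)]
  simp only [List.map_id']
  rfl

-- indexing helper: cols[i] for a nonnegative in-range Int index
theorem pyGetD_toNat (cs : List Int) (i : Int) (n : Nat) (he : i = (n : Int))
    (h1 : n < cs.length) : PySem.List.pyGetD cs i 0 = cs[n] := by
  subst he
  rw [PySem.List.pyGetD_natCast]
  exact List.getD_eq_getElem _ _ h1

theorem mem_pvRowOps (cs : List Int) (r u v : Int) :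
    (u, v) ∈ pvRowOps cs r ↔ r = u ∧ (∃ i : Nat, ∃ hi : i + 1 < cs.length,
      cs[i]'(by omega) + 2 ≤ v ∧ v < cs[i+1]'hi - 1) := by
  unfold pvRowOps
  simp only [List.mem_flatMap, List.mem_map, PySem.List.mem_pyRange_one, Prod.mk.injEq,
    PySem.List.len_eq]
  constructor
  · rintro ⟨i, ⟨hi0, hi1⟩, k, ⟨hk1, hk2⟩, he1, he2⟩
    subst he1; subst he2
    have hn1 : i.toNat + 1 < cs.length := by omega
    have e1 := pyGetD_toNat cs i i.toNat (by omega) (by omega)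
    have e2 := pyGetD_toNat cs (i + 1) (i.toNat + 1) (by omega) hn1
    exact ⟨rfl, i.toNat, hn1, by omega, by omega⟩
  · rintro ⟨rfl, n, hn, hv1, hv2⟩
    have e1 := pyGetD_toNat cs (n : Int) n rfl (by omega)
    have e2 := pyGetD_toNat cs ((n : Int) + 1) (n + 1) (by push_cast; ring) hn
    exact ⟨(n : Int), ⟨by omega, by omega⟩, v, ⟨by omega, by omega⟩, rfl, rfl⟩

theorem mem_pvColOps (cs : List Int) (c u v : Int) :
    (u, v) ∈ pvColOps cs c ↔ c = v ∧ (∃ i : Nat, ∃ hi : i + 1 < cs.length,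
      cs[i]'(by omega) + 2 ≤ u ∧ u < cs[i+1]'hi - 1) := by
  unfold pvColOps
  simp only [List.mem_flatMap, List.mem_map, PySem.List.mem_pyRange_one, Prod.mk.injEq,
    PySem.List.len_eq]
  constructor
  · rintro ⟨i, ⟨hi0, hi1⟩, k, ⟨hk1, hk2⟩, he1, he2⟩
    subst he1; subst he2
    have hn1 : i.toNat + 1 < cs.length := by omega
    have e1 := pyGetD_toNat cs i i.toNat (by omega) (by omega)
    have e2 := pyGetD_toNat cs (i + 1) (i.toNat + 1) (by omega) hn1
    exact ⟨rfl, i.toNat, hn1, by omega, by omega⟩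
  · rintro ⟨rfl, n, hn, hv1, hv2⟩
    have e1 := pyGetD_toNat cs (n : Int) n rfl (by omega)
    have e2 := pyGetD_toNat cs ((n : Int) + 1) (n + 1) (by push_cast; ring) hn
    exact ⟨(n : Int), ⟨by omega, by omega⟩, u, ⟨by omega, by omega⟩, rfl, rfl⟩

theorem pvRowPass_eq (bg lc : Int) (r : Int) (g : List Int) (st : List (List Int)) :
    pvRowPass bg lc st (r, g) =
      pvApply bg lc st (pvRowOps (PySem.List.sorted g (fun x => x)) r) := by
  simp only [pvRowPass, pvRowOps]
  rw [← foldl_pvApply]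
  exact PySem.List.foldl_congr_mem _ _ _ _ (fun acc i _ => (pvApply_map_snd bg lc _ r acc).symm)

theorem pvColPass_eq (bg lc : Int) (c : Int) (g : List Int) (st : List (List Int)) :
    pvColPass bg lc st (c, g) =
      pvApply bg lc st (pvColOps (PySem.List.sorted g (fun x => x)) c) := by
  simp only [pvColPass, pvColOps]
  rw [← foldl_pvApply]
  exact PySem.List.foldl_congr_mem _ _ _ _ (fun acc i _ => (pvApply_map_fst bg lc _ c acc).symm)

theorem pvBStep_eq (grid : List (List Int)) (dc lc bg : Int) (st : List (List Int)) (p : Int × Int) :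
    pvBStep bg lc (pvW grid) (pvH grid) (PySem.Set.ofList (pvCenters grid dc bg)) st p =
      pvApply bg lc st (pvGH grid dc bg p ++ pvGV grid dc bg p) := by
  rw [pvApply_append]
  unfold pvBStep pvGH pvGV
  cases hF : pvFindRight (PySem.Set.ofList (pvCenters grid dc bg)) p.1 (p.2 + 1) (pvW grid) <;>
    cases hD : pvFindDown (PySem.Set.ofList (pvCenters grid dc bg)) p.2 (p.1 + 1) (pvH grid) <;>
      simp only [hF, hD] <;>
        simp [pvApply, List.foldl_map]

-- ---- decompositions of the two ports ----
theorem A_decomp (grid : List (List Int)) (dc lc bg : Int) :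
    connect_aligned_diamonds grid dc lc bg =
      pvApply bg lc grid (pvLAh grid dc bg ++ pvLAv grid dc bg) := by
  simp only [connect_aligned_diamonds]
  rw [pvApply_append]
  have hid : grid.map (fun row => row) = grid := by simp
  rw [hid]
  have hH : (((pvCenters grid dc bg).foldl (fun d p => d.modify p.1 [] (fun v => v ++ [p.2]))
      PySem.Dict.empty).items).foldl (pvRowPass bg lc) grid =
      pvApply bg lc grid (pvLAh grid dc bg) := by
    have hnd : (((pvCenters grid dc bg).foldl (fun d p => d.modify p.1 [] (fun v => v ++ [p.2]))
        PySem.Dict.empty)).keys.Nodup :=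
      PySem.Dict.nodup_keys_foldl_modify_key (pvCenters grid dc bg) (fun p => p.1) []
        (fun _ p => fun v => v ++ [p.2]) PySem.Dict.empty (by simp)
    have hkeys : (((pvCenters grid dc bg).foldl (fun d p => d.modify p.1 [] (fun v => v ++ [p.2]))
        PySem.Dict.empty)).keys = PySem.Set.ofList ((pvCenters grid dc bg).map (fun p => p.1)) := by
      rw [PySem.Dict.keys_foldl_modify_key (pvCenters grid dc bg) (fun p => p.1) []
        (fun _ p => fun v => v ++ [p.2])]
      simp [PySem.Set.update_nil_left]
    have hget : ∀ r : Int, (((pvCenters grid dc bg).foldl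
          (fun d p => d.modify p.1 [] (fun v => v ++ [p.2])) PySem.Dict.empty)).getD r [] =
        ((pvCenters grid dc bg).filter (fun p => p.1 == r)).map (fun p => p.2) := by
      intro r
      rw [PySem.Dict.getD_foldl_modify_append]
      simp
    rw [PySem.Dict.items_eq_map_keys _ hnd [], List.foldl_map]
    have hbody : ∀ (st : List (List Int)) (r : Int),
        r ∈ (((pvCenters grid dc bg).foldl (fun d p => d.modify p.1 [] (fun v => v ++ [p.2]))
          PySem.Dict.empty)).keys →
        pvRowPass bg lc st (r, (((pvCenters grid dc bg).foldl
            (fun d p => d.modify p.1 [] (fun v => v ++ [p.2])) PySem.Dict.empty)).getD r []) =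
          pvApply bg lc st (pvRowOps (pvRowCols grid dc bg r) r) := by
      intro st r hr
      rw [hkeys, PySem.Set.mem_ofList, List.mem_map] at hr
      obtain ⟨p, hp, hp1⟩ := hr
      have hpc : (r, p.2) ∈ pvCenters grid dc bg := by
        rw [← hp1]
        simpa using hp
      have hb := ((mem_pvCenters grid dc bg r p.2).1 hpc).1
      rw [pvRowPass_eq, hget r, grouped_row grid dc bg r hb.1 hb.2,
        PySem.List.sorted_eq_of_perm_of_pairwise_lt _ _ _ (List.Perm.refl _)
          (pairwise_pvRowCols grid dc bg r)]
    rw [PySem.List.foldl_congr_mem _ _ _ _ hbody, foldl_pvApply]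
    unfold pvLAh
    rw [hkeys]
  have hV : ∀ st : List (List Int),
      (((pvCenters grid dc bg).foldl (fun d p => d.modify p.2 [] (fun v => v ++ [p.1]))
      PySem.Dict.empty).items).foldl (pvColPass bg lc) st =
      pvApply bg lc st (pvLAv grid dc bg) := by
    intro st
    have hnd : (((pvCenters grid dc bg).foldl (fun d p => d.modify p.2 [] (fun v => v ++ [p.1]))
        PySem.Dict.empty)).keys.Nodup :=
      PySem.Dict.nodup_keys_foldl_modify_key (pvCenters grid dc bg) (fun p => p.2) []
        (fun _ p => fun v => v ++ [p.1]) PySem.Dict.empty (by simp)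
    have hkeys : (((pvCenters grid dc bg).foldl (fun d p => d.modify p.2 [] (fun v => v ++ [p.1]))
        PySem.Dict.empty)).keys = PySem.Set.ofList ((pvCenters grid dc bg).map (fun p => p.2)) := by
      rw [PySem.Dict.keys_foldl_modify_key (pvCenters grid dc bg) (fun p => p.2) []
        (fun _ p => fun v => v ++ [p.1])]
      simp [PySem.Set.update_nil_left]
    have hget : ∀ c : Int, (((pvCenters grid dc bg).foldl
          (fun d p => d.modify p.2 [] (fun v => v ++ [p.1])) PySem.Dict.empty)).getD c [] =
        ((pvCenters grid dc bg).filter (fun p => p.2 == c)).map (fun p => p.1) := by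
      intro c
      have := PySem.Dict.getD_foldl_modify_append
        ((pvCenters grid dc bg).map (fun p => (p.2, p.1))) PySem.Dict.empty c
      rw [List.foldl_map] at this
      simp only at this
      rw [this]
      simp [List.filter_map, List.map_map, Function.comp_def]
    rw [PySem.Dict.items_eq_map_keys _ hnd [], List.foldl_map]
    have hbody : ∀ (st : List (List Int)) (c : Int),
        c ∈ (((pvCenters grid dc bg).foldl (fun d p => d.modify p.2 [] (fun v => v ++ [p.1]))
          PySem.Dict.empty)).keys →
        pvColPass bg lc st (c, (((pvCenters grid dc bg).foldl
            (fun d p => d.modify p.2 [] (fun v => v ++ [p.1])) PySem.Dict.empty)).getD c []) =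
          pvApply bg lc st (pvColOps (pvColRows grid dc bg c) c) := by
      intro st c hc
      rw [pvColPass_eq, hget c, grouped_col grid dc bg c,
        PySem.List.sorted_eq_of_perm_of_pairwise_lt _ _ _ (List.Perm.refl _)
          (pairwise_pvColRows grid dc bg c)]
    rw [PySem.List.foldl_congr_mem _ _ _ _ hbody, foldl_pvApply]
    unfold pvLAv
    rw [hkeys]
  rw [hH, hV]

theorem B_decomp (grid : List (List Int)) (dc lc bg : Int) :
    connect_aligned_diamonds_alt grid dc lc bg =
      pvApply bg lc grid (pvLB grid dc bg) := by
  simp only [connect_aligned_diamonds_alt]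
  have hid : grid.map (fun row => row) = grid := by simp
  rw [hid]
  rw [PySem.List.foldl_congr_mem _ _ _ _ (fun st p _ => pvBStep_eq grid dc lc bg st p), foldl_pvApply]
  rfl

-- ---- scan characterizations ----
theorem pvFindRight_eq_some_iff (S : PySem.Set (Int × Int)) (r w c2 : Int) : ∀ (s : Int),
    (pvFindRight S r s w = some c2 ↔
      s ≤ c2 ∧ c2 < w ∧ (r, c2) ∈ S ∧ ∀ x : Int, s ≤ x → x < c2 → (r, x) ∉ S) := by
  suffices h : ∀ (n : Nat) (s : Int), (w - s).toNat = n →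
      (pvFindRight S r s w = some c2 ↔
        s ≤ c2 ∧ c2 < w ∧ (r, c2) ∈ S ∧ ∀ x : Int, s ≤ x → x < c2 → (r, x) ∉ S) by
    intro s
    exact h (w - s).toNat s rfl
  intro n
  induction n with
  | zero =>
    intro s hs
    rw [pvFindRight, dif_neg (by omega)]
    constructor
    · intro h
      exact absurd h (by simp)
    · rintro ⟨h1, h2, -, -⟩
      omega
  | succ n ih =>
    intro s hs
    rw [pvFindRight, dif_pos (by omega)]
    by_cases hc : (r, s) ∈ S
    · rw [if_pos ((PySem.Set.contains_iff S (r, s)).2 hc)]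
      constructor
      · intro h
        have hsc : s = c2 := by simpa using h
        subst hsc
        exact ⟨le_refl s, by omega, hc, fun x hx1 hx2 _ => by omega⟩
      · rintro ⟨h1, h2, h3, h4⟩
        have : ¬ s < c2 := fun hlt => h4 s (le_refl s) hlt hc
        have : s = c2 := by omega
        simp [this]
    · rw [if_neg (by
        cases hcc : PySem.Set.contains S (r, s)
        · simp
        · exact absurd ((PySem.Set.contains_iff S (r, s)).1 hcc) hc)]
      rw [ih (s + 1) (by omega)]
      constructor
      · rintro ⟨h1, h2, h3, h4⟩
        refine ⟨by omega, h2, h3, fun x hx1 hx2 => ?_⟩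
        rcases eq_or_lt_of_le hx1 with rfl | hlt
        · exact hc
        · exact h4 x (by omega) hx2
      · rintro ⟨h1, h2, h3, h4⟩
        have hne : s ≠ c2 := fun he => hc (he ▸ h3)
        exact ⟨by omega, h2, h3, fun x hx1 hx2 => h4 x (by omega) hx2⟩

theorem pvFindDown_eq_some_iff (S : PySem.Set (Int × Int)) (c h r2 : Int) : ∀ (s : Int),
    (pvFindDown S c s h = some r2 ↔
      s ≤ r2 ∧ r2 < h ∧ (r2, c) ∈ S ∧ ∀ x : Int, s ≤ x → x < r2 → (x, c) ∉ S) := by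
  suffices hsuf : ∀ (n : Nat) (s : Int), (h - s).toNat = n →
      (pvFindDown S c s h = some r2 ↔
        s ≤ r2 ∧ r2 < h ∧ (r2, c) ∈ S ∧ ∀ x : Int, s ≤ x → x < r2 → (x, c) ∉ S) by
    intro s
    exact hsuf (h - s).toNat s rfl
  intro n
  induction n with
  | zero =>
    intro s hs
    rw [pvFindDown, dif_neg (by omega)]
    constructor
    · intro hh
      exact absurd hh (by simp)
    · rintro ⟨h1, h2, -, -⟩
      omega
  | succ n ih =>
    intro s hs
    rw [pvFindDown, dif_pos (by omega)]
    by_cases hc : (s, c) ∈ S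
    · rw [if_pos ((PySem.Set.contains_iff S (s, c)).2 hc)]
      constructor
      · intro hh
        have hsc : s = r2 := by simpa using hh
        subst hsc
        exact ⟨le_refl s, by omega, hc, fun x hx1 hx2 _ => by omega⟩
      · rintro ⟨h1, h2, h3, h4⟩
        have : ¬ s < r2 := fun hlt => h4 s (le_refl s) hlt hc
        have : s = r2 := by omega
        simp [this]
    · rw [if_neg (by
        cases hcc : PySem.Set.contains S (s, c)
        · simp
        · exact absurd ((PySem.Set.contains_iff S (s, c)).1 hcc) hc)]
      rw [ih (s + 1) (by omega)]
      constructor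
      · rintro ⟨h1, h2, h3, h4⟩
        refine ⟨by omega, h2, h3, fun x hx1 hx2 => ?_⟩
        rcases eq_or_lt_of_le hx1 with rfl | hlt
        · exact hc
        · exact h4 x (by omega) hx2
      · rintro ⟨h1, h2, h3, h4⟩
        have hne : s ≠ r2 := fun he => hc (he ▸ h3)
        exact ⟨by omega, h2, h3, fun x hx1 hx2 => h4 x (by omega) hx2⟩

-- ---- membership characterizations ----
theorem mem_pvLAh (grid : List (List Int)) (dc bg : Int) (u v : Int) :
    (u, v) ∈ pvLAh grid dc bg ↔ pvCanH grid dc bg u v := by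
  unfold pvLAh
  rw [List.mem_flatMap]
  constructor
  · rintro ⟨r, hrK, hops⟩
    obtain ⟨hru, hidx⟩ := (mem_pvRowOps _ r u v).1 hops
    subst hru
    rw [PySem.Set.mem_ofList, List.mem_map] at hrK
    obtain ⟨p, hp, hp1⟩ := hrK
    have hpc : (r, p.2) ∈ pvCenters grid dc bg := by
      rw [← hp1]
      simpa using hp
    have hu := ((mem_pvCenters grid dc bg r p.2).1 hpc).1
    obtain ⟨a, b, ha, hb, hab, hfree, h5, h6⟩ :=
      (adj_iff (pvRowCols grid dc bg r) (pairwise_pvRowCols grid dc bg r) v).1 hidx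
    refine ⟨a, b, ?_, ?_, hab, ?_, h5, h6⟩
    · exact (mem_pvCenters grid dc bg r a).2 ⟨hu, ha⟩
    · exact (mem_pvCenters grid dc bg r b).2 ⟨hu, hb⟩
    · intro z hz1 hz2 hzc
      exact hfree z ((mem_pvCenters grid dc bg r z).1 hzc).2 ⟨hz1, hz2⟩
  · rintro ⟨a, b, ha, hb, hab, hfree, h5, h6⟩
    have hu := ((mem_pvCenters grid dc bg u a).1 ha).1
    refine ⟨u, ?_, ?_⟩
    · rw [PySem.Set.mem_ofList]
      exact List.mem_map.2 ⟨(u, a), ha, rfl⟩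
    · rw [mem_pvRowOps]
      refine ⟨rfl, (adj_iff (pvRowCols grid dc bg u) (pairwise_pvRowCols grid dc bg u) v).2
        ⟨a, b, ((mem_pvCenters grid dc bg u a).1 ha).2, ((mem_pvCenters grid dc bg u b).1 hb).2,
          hab, ?_, h5, h6⟩⟩
      rintro z hz ⟨hz1, hz2⟩
      exact hfree z hz1 hz2 ((mem_pvCenters grid dc bg u z).2 ⟨hu, hz⟩)

theorem mem_pvLAv (grid : List (List Int)) (dc bg : Int) (u v : Int) :
    (u, v) ∈ pvLAv grid dc bg ↔ pvCanV grid dc bg u v := by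
  unfold pvLAv
  rw [List.mem_flatMap]
  constructor
  · rintro ⟨c, hcK, hops⟩
    obtain ⟨hcv, hidx⟩ := (mem_pvColOps _ c u v).1 hops
    subst hcv
    obtain ⟨a, b, ha, hb, hab, hfree, h5, h6⟩ :=
      (adj_iff (pvColRows grid dc bg c) (pairwise_pvColRows grid dc bg c) u).1 hidx
    refine ⟨a, b, (mem_pvColRows grid dc bg a c).1 ha, (mem_pvColRows grid dc bg b c).1 hb,
      hab, ?_, h5, h6⟩
    intro z hz1 hz2 hzc
    exact hfree z ((mem_pvColRows grid dc bg z c).2 hzc) ⟨hz1, hz2⟩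
  · rintro ⟨a, b, ha, hb, hab, hfree, h5, h6⟩
    refine ⟨v, ?_, ?_⟩
    · rw [PySem.Set.mem_ofList]
      exact List.mem_map.2 ⟨(a, v), ha, rfl⟩
    · rw [mem_pvColOps]
      refine ⟨rfl, (adj_iff (pvColRows grid dc bg v) (pairwise_pvColRows grid dc bg v) u).2
        ⟨a, b, (mem_pvColRows grid dc bg a v).2 ha, (mem_pvColRows grid dc bg b v).2 hb,
          hab, ?_, h5, h6⟩⟩
      rintro z hz ⟨hz1, hz2⟩
      exact hfree z hz1 hz2 ((mem_pvColRows grid dc bg z v).1 hz)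

theorem mem_pvLB (grid : List (List Int)) (dc bg : Int) (u v : Int) :
    (u, v) ∈ pvLB grid dc bg ↔ pvCanH grid dc bg u v ∨ pvCanV grid dc bg u v := by
  unfold pvLB
  rw [List.mem_flatMap]
  constructor
  · rintro ⟨p, hp, hmem⟩
    rcases List.mem_append.1 hmem with h | h
    · left
      unfold pvGH at h
      rcases hF : pvFindRight (PySem.Set.ofList (pvCenters grid dc bg)) p.1 (p.2 + 1) (pvW grid)
        with _ | c2
      · rw [hF] at h
        simp at h
      · rw [hF] at h
        obtain ⟨k, hk, hke⟩ := List.mem_map.1 h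
        rw [PySem.List.mem_pyRange_one] at hk
        obtain ⟨he1, he2⟩ := Prod.mk.injEq .. ▸ hke
        obtain ⟨hc1, hc2, hc3, hc4⟩ :=
          (pvFindRight_eq_some_iff (PySem.Set.ofList (pvCenters grid dc bg)) p.1 (pvW grid) c2
            (p.2 + 1)).1 hF
        rw [PySem.Set.mem_ofList] at hc3
        refine ⟨p.2, c2, ?_, ?_, by omega, ?_, by omega, by omega⟩
        · rw [← he1]
          simpa using hp
        · rw [← he1]
          exact hc3
        · intro z hz1 hz2 hzc
          refine hc4 z (by omega) (by omega) ?_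
          rw [PySem.Set.mem_ofList, he1]
          exact hzc
    · right
      unfold pvGV at h
      rcases hD : pvFindDown (PySem.Set.ofList (pvCenters grid dc bg)) p.2 (p.1 + 1) (pvH grid)
        with _ | r2
      · rw [hD] at h
        simp at h
      · rw [hD] at h
        obtain ⟨k, hk, hke⟩ := List.mem_map.1 h
        rw [PySem.List.mem_pyRange_one] at hk
        obtain ⟨he1, he2⟩ := Prod.mk.injEq .. ▸ hke
        obtain ⟨hc1, hc2, hc3, hc4⟩ :=
          (pvFindDown_eq_some_iff (PySem.Set.ofList (pvCenters grid dc bg)) p.2 (pvH grid) r2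
            (p.1 + 1)).1 hD
        rw [PySem.Set.mem_ofList] at hc3
        refine ⟨p.1, r2, ?_, ?_, by omega, ?_, by omega, by omega⟩
        · rw [← he2]
          simpa using hp
        · rw [← he2]
          exact hc3
        · intro z hz1 hz2 hzc
          refine hc4 z (by omega) (by omega) ?_
          rw [PySem.Set.mem_ofList, he2]
          exact hzc
  · rintro (⟨a, b, ha, hb, hab, hfree, h5, h6⟩ | ⟨a, b, ha, hb, hab, hfree, h5, h6⟩)
    · have hbw : b < pvW grid - 1 :=
        ((mem_pvRowCols grid dc bg u b).1 ((mem_pvCenters grid dc bg u b).1 hb).2).1.2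
      have hfind : pvFindRight (PySem.Set.ofList (pvCenters grid dc bg)) u (a + 1) (pvW grid) =
          some b := by
        rw [pvFindRight_eq_some_iff]
        refine ⟨by omega, by omega, PySem.Set.mem_ofList _ _ |>.2 hb, ?_⟩
        intro x hx1 hx2 hxS
        exact hfree x (by omega) (by omega) ((PySem.Set.mem_ofList _ _).1 hxS)
      refine ⟨(u, a), ha, List.mem_append.2 (Or.inl ?_)⟩
      unfold pvGH
      rw [hfind]
      exact List.mem_map.2 ⟨v, PySem.List.mem_pyRange_one.2 ⟨by omega, by omega⟩, rfl⟩
    · have hbh : b < pvH grid - 1 :=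
        ((mem_pvCenters grid dc bg b v).1 hb).1.2
      have hfind : pvFindDown (PySem.Set.ofList (pvCenters grid dc bg)) v (a + 1) (pvH grid) =
          some b := by
        rw [pvFindDown_eq_some_iff]
        refine ⟨by omega, by omega, PySem.Set.mem_ofList _ _ |>.2 hb, ?_⟩
        intro x hx1 hx2 hxS
        exact hfree x (by omega) (by omega) ((PySem.Set.mem_ofList _ _).1 hxS)
      refine ⟨(a, v), ha, List.mem_append.2 (Or.inr ?_)⟩
      unfold pvGV
      rw [hfind]
      exact List.mem_map.2 ⟨u, PySem.List.mem_pyRange_one.2 ⟨by omega, by omega⟩, rfl⟩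

theorem pvCanH_nonneg (grid : List (List Int)) (dc bg : Int) (u v : Int)
    (h : pvCanH grid dc bg u v) : 0 ≤ u ∧ 0 ≤ v := by
  obtain ⟨a, b, ha, _, _, _, h5, _⟩ := h
  have := (mem_pvCenters grid dc bg u a).1 ha
  have := (mem_pvRowCols grid dc bg u a).1 this.2
  omega

theorem pvCanV_nonneg (grid : List (List Int)) (dc bg : Int) (u v : Int)
    (h : pvCanV grid dc bg u v) : 0 ≤ u ∧ 0 ≤ v := by
  obtain ⟨a, b, ha, _, _, _, h5, _⟩ := h
  have h1 := (mem_pvCenters grid dc bg a v).1 ha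
  have := (mem_pvRowCols grid dc bg a v).1 h1.2
  omega

-- ===== VERDICT (by name: the statement is the Claim_ definition above) =====
theorem connect_aligned_diamonds_spec : Claim_equal_connect_aligned_diamonds := by
  intro grid dc lc bg _ _
  unfold Spec_connect_aligned_diamonds
  rw [A_decomp, B_decomp]
  apply pvApply_eq_of_mem_iff
  · intro rc hrc
    rcases List.mem_append.1 hrc with h | h
    · exact pvCanH_nonneg grid dc bg rc.1 rc.2 ((mem_pvLAh grid dc bg rc.1 rc.2).1 h)
    · exact pvCanV_nonneg grid dc bg rc.1 rc.2 ((mem_pvLAv grid dc bg rc.1 rc.2).1 h)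
  · intro rc hrc
    rcases (mem_pvLB grid dc bg rc.1 rc.2).1 hrc with h | h
    · exact pvCanH_nonneg grid dc bg rc.1 rc.2 h
    · exact pvCanV_nonneg grid dc bg rc.1 rc.2 h
  · intro p
    rw [List.mem_append, mem_pvLAh, mem_pvLAv, mem_pvLB]
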